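-- pv_equiv track=rewrite | github.com/Nosinus/Hackathon-datssol | src/games/datssol/graph.py | build_support_graph
-- ===== SOURCE A (Python) =====
-- from collections import defaultdict
--
-- Point = tuple[int, int]
--
-- def build_support_graph(nodes: list[Point], signal_range: int) -> dict[Point, set[Point]]:
--     graph: dict[Point, set[Point]] = defaultdict(set)
--     for i, src in enumerate(nodes):
--         for dst in nodes[i + 1 :]:
--             if in_square_range(src, dst, signal_range):
--                 graph[src].add(dst)
--                 graph[dst].add(src)
--         graph.setdefault(src, set())
--     return graph
--
-- def in_square_range(src: Point, dst: Point, rng: int) -> bool: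
--     return abs(src[0] - dst[0]) <= rng and abs(src[1] - dst[1]) <= rng
-- ===== SOURCE B (Python) =====
-- from collections import defaultdict
--
-- def build_support_graph(nodes, signal_range):
--     # Spatial grid: bucket points into cells of side max(signal_range, 1) and
--     # compare each point only against points in the 3x3 neighbourhood of its cell.
--     cell = max(signal_range, 1)
--     cells = {}
--     for i, (x, y) in enumerate(nodes):
--         cells.setdefault((x // cell, y // cell), []).append(i)
--
--     def neighbors(i, x, y):
--         cx, cy = x // cell, y // cell
--         cand = []
--         for dx in (-1, 0, 1):
--             for dy in (-1, 0, 1):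
--                 cand += cells.get((cx + dx, cy + dy), [])
--         cand.sort()
--         return [j for j in cand
--                 if j != i
--                 and abs(x - nodes[j][0]) <= signal_range
--                 and abs(y - nodes[j][1]) <= signal_range]
--
--     nbr = [neighbors(i, x, y) for i, (x, y) in enumerate(nodes)]
--
--     graph = defaultdict(set)
--     for i, src in enumerate(nodes):
--         for j in nbr[i]:
--             if j > i:
--                 graph[src].add(nodes[j])
--                 graph[nodes[j]].add(src)
--         graph.setdefault(src, set())
--     return graph
-- ===== Notes on version B (the rewrite author's own statement) =====
-- stated objective: alternative
-- what changed: B replaces A's all-pairs scan with spatial grid bucketing: points are hashed into cells of side max(signal_range,1) and each point is compared only against points in the 3x3 neighbouring cells; it trades the unconditional O(n^2) scan for O(n + candidate pairs), which degenerates back to all pairs when every point is within range (the timed dense family).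
import Mathlib
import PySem

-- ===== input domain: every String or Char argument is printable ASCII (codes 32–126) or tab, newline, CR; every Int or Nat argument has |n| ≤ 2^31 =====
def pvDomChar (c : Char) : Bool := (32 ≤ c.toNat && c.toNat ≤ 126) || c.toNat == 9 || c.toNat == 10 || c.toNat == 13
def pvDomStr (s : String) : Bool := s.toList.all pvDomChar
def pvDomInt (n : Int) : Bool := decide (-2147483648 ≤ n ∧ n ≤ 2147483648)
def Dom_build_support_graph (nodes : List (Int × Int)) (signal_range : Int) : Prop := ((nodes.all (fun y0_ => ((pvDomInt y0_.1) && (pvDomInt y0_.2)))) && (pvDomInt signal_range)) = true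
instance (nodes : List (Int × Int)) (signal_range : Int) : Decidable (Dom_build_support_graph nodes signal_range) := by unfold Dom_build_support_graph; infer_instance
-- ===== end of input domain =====

-- B re-implements A by spatial grid bucketing (cells of side max(signal_range, 1);
-- each point is compared only to points of the 3x3 neighbouring cells) instead of
-- A's scan over all pairs; return values are proved identical on every input.

-- ===== PORT A =====
def in_square_range (src dst : Int × Int) (rng : Int) : Bool :=
  decide (|src.1 - dst.1| ≤ rng ∧ |src.2 - dst.2| ≤ rng)

-- graph[k].add(v) on a defaultdict(set) (also what graph.setdefault(k, set()).add(v) does)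
def gAdd (g : PySem.Dict (Int × Int) (PySem.Set (Int × Int))) (k v : Int × Int) :
    PySem.Dict (Int × Int) (PySem.Set (Int × Int)) :=
  g.modify k PySem.Set.empty (fun s => PySem.Set.add s v)

def build_support_graph (nodes : List (Int × Int)) (signal_range : Int) :
    List (Int × Int × List (Int × Int)) :=
  let graph := (PySem.List.enumerate nodes 0).foldl
    (fun g p =>
      let g := (PySem.List.slice nodes (some (p.1 + 1)) none).foldl
        (fun g dst =>
          if in_square_range p.2 dst signal_range then gAdd (gAdd g p.2 dst) dst p.2 else g) g
      g.setdefault p.2 PySem.Set.empty)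
    PySem.Dict.empty
  graph.items.map (fun q => (q.1.1, q.1.2, q.2))

-- ===== PORT B =====
def cellOf (cell x y : Int) : Int × Int :=
  (PySem.Int.floordiv x cell, PySem.Int.floordiv y cell)

def buildCells (nodes : List (Int × Int)) (cell : Int) : PySem.Dict (Int × Int) (List Int) :=
  (PySem.List.enumerate nodes 0).foldl
    (fun d p => d.modify (cellOf cell p.2.1 p.2.2) [] (fun l => l ++ [p.1]))
    PySem.Dict.empty

def neighbors (nodes : List (Int × Int)) (signal_range cell : Int)
    (cells : PySem.Dict (Int × Int) (List Int)) (i x y : Int) : List Int :=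
  let c := cellOf cell x y
  let cand := ([-1, 0, 1] : List Int).foldl (fun acc dx =>
      ([-1, 0, 1] : List Int).foldl (fun acc dy => acc ++ cells.getD (c.1 + dx, c.2 + dy) []) acc) []
  let cand := PySem.List.sorted cand (fun j => j)
  cand.filter (fun j =>
    decide (j ≠ i ∧ |x - (PySem.List.pyGetD nodes j (0, 0)).1| ≤ signal_range ∧
      |y - (PySem.List.pyGetD nodes j (0, 0)).2| ≤ signal_range))

def build_support_graph_alt (nodes : List (Int × Int)) (signal_range : Int) :
    List (Int × Int × List (Int × Int)) :=
  let cell := max signal_range 1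
  let cells := buildCells nodes cell
  let nbr := (PySem.List.enumerate nodes 0).map
    (fun p => neighbors nodes signal_range cell cells p.1 p.2.1 p.2.2)
  let graph := (PySem.List.enumerate nodes 0).foldl
    (fun g p =>
      let g := (PySem.List.pyGetD nbr p.1 []).foldl
        (fun g j =>
          if p.1 < j then
            gAdd (gAdd g p.2 (PySem.List.pyGetD nodes j (0, 0)))
              (PySem.List.pyGetD nodes j (0, 0)) p.2
          else g) g
      g.setdefault p.2 PySem.Set.empty)
    PySem.Dict.empty
  graph.items.map (fun q => (q.1.1, q.1.2, q.2))

-- ===== PRECONDITION & SPEC =====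
def Spec_build_support_graph (nodes : List (Int × Int)) (signal_range : Int) (out : List (Int × Int × List (Int × Int))) : Prop := out = build_support_graph_alt nodes signal_range
instance (nodes : List (Int × Int)) (signal_range : Int) (out : List (Int × Int × List (Int × Int))) : Decidable (Spec_build_support_graph nodes signal_range out) := by unfold Spec_build_support_graph; infer_instance

-- ===== CLAIM (what is proved, stated in full; the proofs are below) =====
def Claim_equal_build_support_graph : Prop := ∀ (nodes : List (Int × Int)) (signal_range : Int), Dom_build_support_graph nodes signal_range → Spec_build_support_graph nodes signal_range (build_support_graph nodes signal_range)

-- ===== LEMMAS AND PROOFS =====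

-- two points within c of each other land in the same or an adjacent grid cell
theorem fdiv_near {a b c : Int} (hc : 0 < c) (h : |a - b| ≤ c) :
    |PySem.Int.floordiv a c - PySem.Int.floordiv b c| ≤ 1 := by
  rw [abs_le] at h
  have hb := (PySem.Int.floordiv_eq_iff_of_pos (a := b) (q := PySem.Int.floordiv b c) hc).mp rfl
  have h1 : PySem.Int.floordiv b c - 1 ≤ PySem.Int.floordiv a c := by
    rw [PySem.Int.le_floordiv_iff_mul_le hc]; nlinarith [hb.1, hb.2]
  have h2 : PySem.Int.floordiv a c < PySem.Int.floordiv b c + 2 := by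
    rw [PySem.Int.floordiv_lt_iff_lt_mul hc]; nlinarith [hb.1, hb.2]
  rw [abs_le]; omega

theorem buildCells_getD (nodes : List (Int × Int)) (cell : Int) (c : Int × Int) :
    (buildCells nodes cell).getD c []
      = ((PySem.List.enumerate nodes 0).filter
          (fun p => cellOf cell p.2.1 p.2.2 == c)).map (fun p => p.1) := by
  unfold buildCells
  have hmap : (PySem.List.enumerate nodes 0).foldl
      (fun d p => d.modify (cellOf cell p.2.1 p.2.2) [] (fun l => l ++ [p.1]))
      PySem.Dict.empty
    = ((PySem.List.enumerate nodes 0).map (fun p => (cellOf cell p.2.1 p.2.2, p.1))).foldl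
      (fun d q => d.modify q.1 [] (fun l => l ++ [q.2])) PySem.Dict.empty := by
    rw [List.foldl_map]
  rw [hmap, PySem.Dict.getD_foldl_modify_append, List.filter_map, List.map_map]
  simp [Function.comp_def]

theorem mem_buildCells_getD (nodes : List (Int × Int)) (cell : Int) (c : Int × Int) (j : Int) :
    j ∈ (buildCells nodes cell).getD c []
      ↔ ∃ (k : Nat) (h : k < nodes.length),
          j = (k : Int) ∧ cellOf cell (nodes[k]).1 (nodes[k]).2 = c := by
  rw [buildCells_getD]
  simp only [List.mem_map, List.mem_filter, PySem.List.mem_enumerate_iff, beq_iff_eq]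
  constructor
  · rintro ⟨p, ⟨⟨k, hk, rfl⟩, hc⟩, rfl⟩
    exact ⟨k, hk, by simp, by simpa using hc⟩
  · rintro ⟨k, hk, rfl, hc⟩
    exact ⟨(0 + (k : Int), nodes[k]), ⟨⟨k, hk, rfl⟩, by simpa using hc⟩, by simp⟩

theorem nodup_buildCells_getD (nodes : List (Int × Int)) (cell : Int) (c : Int × Int) :
    ((buildCells nodes cell).getD c []).Nodup := by
  rw [buildCells_getD]
  have hsub : (((PySem.List.enumerate nodes 0).filter
      (fun p => cellOf cell p.2.1 p.2.2 == c)).map (fun p => p.1)).Sublist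
      ((PySem.List.enumerate nodes 0).map (fun p => p.1)) :=
    List.Sublist.map _ List.filter_sublist
  apply hsub.nodup
  rw [PySem.List.map_fst_enumerate]
  simp only [zero_add, PySem.List.pyRange_zero_natCast]
  exact (List.nodup_range).map (fun a b h => by exact_mod_cast h)

theorem neighbors_eq (nodes : List (Int × Int)) (signal_range : Int) (k : Nat)
    (hk : k < nodes.length) :
    neighbors nodes signal_range (max signal_range 1)
        (buildCells nodes (max signal_range 1)) (k : Int) (nodes[k]).1 (nodes[k]).2
      = (PySem.List.pyRange 0 (nodes.length : Int)).filter
          (fun j => decide ((j ≠ (k : Int)) ∧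
            |(nodes[k]).1 - (PySem.List.pyGetD nodes j (0, 0)).1| ≤ signal_range ∧
            |(nodes[k]).2 - (PySem.List.pyGetD nodes j (0, 0)).2| ≤ signal_range)) := by
  have hcl : (0:Int) < max signal_range 1 := lt_of_lt_of_le one_pos (le_max_right _ _)
  unfold neighbors
  simp only [PySem.List.foldl_append_eq_flatMap, List.nil_append]
  set cl := max signal_range 1 with hcldef
  set c := cellOf cl (nodes[k]).1 (nodes[k]).2 with hcdef
  set CAND := ([-1, 0, 1] : List Int).flatMap (fun dx =>
      ([-1, 0, 1] : List Int).flatMap (fun dy =>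
        (buildCells nodes cl).getD (c.1 + dx, c.2 + dy) [])) with hCAND
  set nearB : Int → Bool := fun j =>
    decide (|PySem.Int.floordiv (PySem.List.pyGetD nodes j (0, 0)).1 cl - c.1| ≤ 1 ∧
      |PySem.Int.floordiv (PySem.List.pyGetD nodes j (0, 0)).2 cl - c.2| ≤ 1) with hnearB
  have hmem : ∀ j : Int, j ∈ CAND ↔ j ∈ (PySem.List.pyRange 0 (nodes.length : Int)).filter nearB := by
    intro j
    rw [hCAND]
    simp only [List.mem_flatMap, mem_buildCells_getD, List.mem_filter,
      PySem.List.mem_pyRange_one, hnearB]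
    constructor
    · rintro ⟨dx, hdx, dy, hdy, k', hk', rfl, hcell⟩
      have hget : PySem.List.pyGetD nodes (k' : Int) (0, 0) = nodes[k'] := by
        rw [PySem.List.pyGetD_eq_getElem nodes (0, 0) (by positivity) (by exact_mod_cast hk')]
        simp
      have hdx' : dx = -1 ∨ dx = 0 ∨ dx = 1 := by simpa using hdx
      have hdy' : dy = -1 ∨ dy = 0 ∨ dy = 1 := by simpa using hdy
      have h1 : PySem.Int.floordiv (nodes[k']).1 cl = c.1 + dx := congrArg Prod.fst hcell
      have h2 : PySem.Int.floordiv (nodes[k']).2 cl = c.2 + dy := congrArg Prod.snd hcell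
      refine ⟨⟨by positivity, by exact_mod_cast hk'⟩, ?_⟩
      rw [hget]
      refine decide_eq_true ⟨?_, ?_⟩ <;> rw [abs_le] <;> omega
    · rintro ⟨⟨h0, hn⟩, hnear⟩
      have hk' : j.toNat < nodes.length := by omega
      have hget : PySem.List.pyGetD nodes j (0, 0) = nodes[j.toNat] := by
        rw [PySem.List.pyGetD_eq_getElem nodes (0, 0) h0 hn]
      rw [hget] at hnear
      have hnear' := of_decide_eq_true hnear
      obtain ⟨ha, hb⟩ := hnear'
      rw [abs_le] at ha hb
      refine ⟨PySem.Int.floordiv (nodes[j.toNat]).1 cl - c.1, by simp; omega,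
        PySem.Int.floordiv (nodes[j.toNat]).2 cl - c.2, by simp; omega,
        j.toNat, hk', by omega, ?_⟩
      unfold cellOf
      ext <;> simp
  have hdisj : ∀ c₁ c₂ : Int × Int, c₁ ≠ c₂ →
      List.Disjoint ((buildCells nodes cl).getD c₁ []) ((buildCells nodes cl).getD c₂ []) := by
    intro c₁ c₂ hne j h1 h2
    rw [mem_buildCells_getD] at h1 h2
    obtain ⟨k₁, hk₁, he₁, hc₁⟩ := h1
    obtain ⟨k₂, hk₂, he₂, hc₂⟩ := h2
    have : k₁ = k₂ := by omega
    subst this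
    exact hne (hc₁ ▸ hc₂ ▸ rfl)
  have hnodup : CAND.Nodup := by
    rw [hCAND, List.nodup_flatMap]
    constructor
    · intro dx _
      rw [List.nodup_flatMap]
      constructor
      · intro dy _; exact nodup_buildCells_getD _ _ _
      · refine List.pairwise_iff_forall_sublist.mpr ?_
        intro dy dy' hsub
        have hne : dy ≠ dy' := by
          have := hsub.nodup (by decide)
          simp at this; exact this
        exact hdisj _ _ (by simp [Prod.ext_iff]; omega)
    · refine List.pairwise_iff_forall_sublist.mpr ?_
      intro dx dx' hsub
      have hne : dx ≠ dx' := by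
        have := hsub.nodup (by decide)
        simp at this; exact this
      intro j hj hj'
      rw [List.mem_flatMap] at hj hj'
      obtain ⟨dy, _, hj⟩ := hj
      obtain ⟨dy', _, hj'⟩ := hj'
      exact hdisj _ _ (by simp [Prod.ext_iff]; omega) hj hj'
  have hpairL : ((PySem.List.pyRange 0 (nodes.length : Int)).filter nearB).Pairwise (· < ·) := by
    apply List.Pairwise.filter
    rw [PySem.List.pyRange_zero_natCast]
    exact List.pairwise_lt_range.map _ (fun a b h => by exact_mod_cast h)
  have hnodupL : ((PySem.List.pyRange 0 (nodes.length : Int)).filter nearB).Nodup :=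
    hpairL.imp ne_of_lt
  have hperm : ((PySem.List.pyRange 0 (nodes.length : Int)).filter nearB).Perm CAND :=
    (List.perm_ext_iff_of_nodup hnodupL hnodup).mpr (fun j => (hmem j).symm)
  rw [PySem.List.sorted_eq_of_perm_of_pairwise_lt CAND _ (fun j => j) hperm hpairL,
    List.filter_filter]
  apply List.filter_congr
  intro j hj
  rw [PySem.List.mem_pyRange_one] at hj
  obtain ⟨h0, hn⟩ := hj
  have hget : PySem.List.pyGetD nodes j (0, 0) = nodes[j.toNat] := by
    rw [PySem.List.pyGetD_eq_getElem nodes (0, 0) h0 hn]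
  by_cases hP : (j ≠ (k : Int)) ∧
      |(nodes[k]).1 - (PySem.List.pyGetD nodes j (0, 0)).1| ≤ signal_range ∧
      |(nodes[k]).2 - (PySem.List.pyGetD nodes j (0, 0)).2| ≤ signal_range
  · obtain ⟨hne, ha, hb⟩ := hP
    have hrc : signal_range ≤ cl := le_max_left _ _
    have hna : |PySem.Int.floordiv (PySem.List.pyGetD nodes j (0, 0)).1 cl - c.1| ≤ 1 := by
      rw [hcdef]
      exact fdiv_near hcl (by rw [abs_sub_comm]; exact le_trans ha hrc)
    have hnb : |PySem.Int.floordiv (PySem.List.pyGetD nodes j (0, 0)).2 cl - c.2| ≤ 1 := by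
      rw [hcdef]
      exact fdiv_near hcl (by rw [abs_sub_comm]; exact le_trans hb hrc)
    rw [show nearB j = true from decide_eq_true ⟨hna, hnb⟩, Bool.and_true]
  · rw [decide_eq_false hP, Bool.false_and]

theorem filter_lt_pyRange (n : Int) (k : Nat) (hk : (k : Int) < n) :
    (PySem.List.pyRange 0 n).filter (fun j => decide ((k : Int) < j))
      = PySem.List.pyRange ((k : Int) + 1) n := by
  rw [PySem.List.pyRange_one_append 0 ((k : Int) + 1) n (by positivity) (by omega),
    List.filter_append]
  have h1 : (PySem.List.pyRange 0 ((k : Int) + 1)).filter (fun j => decide ((k : Int) < j)) = [] := by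
    apply List.filter_eq_nil_iff.mpr
    intro a ha
    rw [PySem.List.mem_pyRange_one] at ha
    simp only [decide_eq_true_eq]; omega
  have h2 : (PySem.List.pyRange ((k : Int) + 1) n).filter (fun j => decide ((k : Int) < j))
      = PySem.List.pyRange ((k : Int) + 1) n := by
    apply List.filter_eq_self.mpr
    intro a ha
    rw [PySem.List.mem_pyRange_one] at ha
    simp only [decide_eq_true_eq]; omega
  rw [h1, h2, List.nil_append]

theorem inner_lists_eq (nodes : List (Int × Int)) (signal_range : Int) (k : Nat)
    (hk : k < nodes.length) :
    ((neighbors nodes signal_range (max signal_range 1)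
        (buildCells nodes (max signal_range 1)) (k : Int) (nodes[k]).1 (nodes[k]).2).filter
        (fun j => decide ((k : Int) < j))).map (fun j => PySem.List.pyGetD nodes j (0, 0))
      = (nodes.drop (k + 1)).filter (fun dst => in_square_range nodes[k] dst signal_range) := by
  rw [neighbors_eq nodes signal_range k hk, List.filter_comm,
    filter_lt_pyRange (nodes.length : Int) k (by exact_mod_cast hk)]
  have hdrop : nodes.drop (k + 1)
      = (PySem.List.pyRange ((k : Int) + 1) (nodes.length : Int)).map
          (fun j => PySem.List.pyGetD nodes j (0, 0)) := by
    rw [PySem.List.map_pyGetD_pyRange' nodes (0, 0) (by positivity),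
      show (((k : Int) + 1)).toNat = k + 1 by omega]
  rw [hdrop, List.filter_map]
  apply congrArg (List.map _)
  apply List.filter_congr
  intro a ha
  rw [PySem.List.mem_pyRange_one] at ha
  have hne : a ≠ (k : Int) := by omega
  simp only [Function.comp_def, in_square_range, decide_eq_decide]
  constructor
  · rintro ⟨-, h⟩; exact h
  · intro h; exact ⟨hne, h⟩

theorem builds_eq (nodes : List (Int × Int)) (signal_range : Int) :
    build_support_graph nodes signal_range = build_support_graph_alt nodes signal_range := by
  simp only [build_support_graph, build_support_graph_alt]
  apply congrArg (List.map _)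
  apply congrArg PySem.Dict.items
  apply PySem.List.foldl_congr_mem
  intro g p hp
  rw [PySem.List.mem_enumerate_iff] at hp
  obtain ⟨k, hk, rfl⟩ := hp
  simp only [zero_add]
  apply congrArg (fun g' => PySem.Dict.setdefault g' (nodes[k]) PySem.Set.empty)
  rw [PySem.List.slice_from nodes (by positivity),
    show (((k : Int) + 1)).toNat = k + 1 by omega,
    PySem.List.foldl_if_eq_foldl_filter (fun dst => in_square_range nodes[k] dst signal_range)]
  have hnbr : PySem.List.pyGetD ((PySem.List.enumerate nodes 0).map
        (fun p => neighbors nodes signal_range (max signal_range 1)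
          (buildCells nodes (max signal_range 1)) p.1 p.2.1 p.2.2)) (k : Int) []
      = neighbors nodes signal_range (max signal_range 1)
          (buildCells nodes (max signal_range 1)) (k : Int) (nodes[k]).1 (nodes[k]).2 := by
    rw [PySem.List.pyGetD_eq_getElem _ _ (by positivity)
      (by rw [List.length_map, PySem.List.length_enumerate]; exact_mod_cast hk)]
    rw [List.getElem_map]
    rw [PySem.List.getElem_enumerate]
    simp
  rw [hnbr, PySem.List.foldl_ite_eq_foldl_filter (fun j => (k : Int) < j)]
  have hfm := List.foldl_map (f := fun j => PySem.List.pyGetD nodes j (0, 0))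
    (g := fun (g : PySem.Dict (Int × Int) (PySem.Set (Int × Int))) dst =>
      gAdd (gAdd g nodes[k] dst) dst nodes[k])
    (l := (neighbors nodes signal_range (max signal_range 1)
      (buildCells nodes (max signal_range 1)) (k : Int) (nodes[k]).1 (nodes[k]).2).filter
        (fun j => decide ((k : Int) < j)))
    (init := g)
  rw [← hfm, inner_lists_eq nodes signal_range k hk]

-- ===== VERDICT (by name: the statement is the Claim_ definition above) =====
theorem build_support_graph_spec : Claim_equal_build_support_graph := by
  intro nodes signal_range _
  unfold Spec_build_support_graph
  exact builds_eq nodes signal_range
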